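-- pv_equiv track=rewrite | github.com/LawrenceLiang02/ConUHacks9 | conuhacks-backend/utils/img-extraction.py | merge_product_info
-- ===== SOURCE A (Python) =====
-- from typing import List, Dict, Any
--
-- def merge_product_info(items: List[Dict]) -> List[Dict]:
--     """Merge related product information and remove duplicates"""
--     merged = []
--     current_item = None
--
--     for item in items:
--         name = item.get('name', '').upper()
--
--         # Start new item if it's a main product
--         if any(keyword in name for keyword in ['PIZZA', 'SAUMON', 'CHOU-FLEUR', 'COURONNE', 'GRUAU', 'MARGARINE', 'BLEUETS', 'SOUPE']):
--             if current_item: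
--                 merged.append(current_item)
--             current_item = item
--         # Merge with current item if it's related information
--         elif current_item:
--             # Add missing price
--             if 'price' in item and 'price' not in current_item:
--                 current_item['price'] = item['price']
--             # Add missing volume
--             if 'volume' in item and 'volume' not in current_item:
--                 current_item['volume'] = item['volume']
--             # Merge description
--             if 'description' in item:
--                 if 'description' not in current_item:
--                     current_item['description'] = item['description']
--                 elif item['description'] not in current_item['description']:
--                     current_item['description'] += f" / {item['description']}"
--
--     if current_item:
--         merged.append(current_item)
--
--     return merged
-- ===== SOURCE B (Python) =====
-- KEYWORDS = ('PIZZA', 'SAUMON', 'CHOU-FLEUR', 'COURONNE', 'GRUAU', 'MARGARINE', 'BLEUETS', 'SOUPE')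
--
--
-- def _is_main(item):
--     name = item.get('name', '').upper()
--     return any(k in name for k in KEYWORDS)
--
--
-- def _merge_into(head, item):
--     if 'price' in item and 'price' not in head:
--         head['price'] = item['price']
--     if 'volume' in item and 'volume' not in head:
--         head['volume'] = item['volume']
--     if 'description' in item:
--         if 'description' not in head:
--             head['description'] = item['description']
--         elif item['description'] not in head['description']:
--             head['description'] += f" / {item['description']}"
--     return head
--
--
-- def merge_product_info(items):
--     """Merge related product information and remove duplicates.
--
--     Two passes: first slice the input into groups, each starting at a main
--     product (items before the first main product are dropped); then fold each
--     group's tail into its head (mutating the head dict in place, like the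
--     original)."""
--     n = len(items)
--     i = 0
--     while i < n and not _is_main(items[i]):
--         i += 1
--     groups = []
--     while i < n:
--         j = i + 1
--         while j < n and not _is_main(items[j]):
--             j += 1
--         groups.append(items[i:j])
--         i = j
--     result = []
--     for group in groups:
--         head = group[0]
--         for item in group[1:]:
--             _merge_into(head, item)
--         result.append(head)
--     return result
-- ===== Notes on version B (the rewrite author's own statement) =====
-- stated objective: alternative
-- what changed: Replaces A's single pass with a running current_item accumulator by two passes: first slice the input into groups each headed by a main-product item (dropping leading non-main items), then fold each group's tail into its head.
import Mathlib
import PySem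

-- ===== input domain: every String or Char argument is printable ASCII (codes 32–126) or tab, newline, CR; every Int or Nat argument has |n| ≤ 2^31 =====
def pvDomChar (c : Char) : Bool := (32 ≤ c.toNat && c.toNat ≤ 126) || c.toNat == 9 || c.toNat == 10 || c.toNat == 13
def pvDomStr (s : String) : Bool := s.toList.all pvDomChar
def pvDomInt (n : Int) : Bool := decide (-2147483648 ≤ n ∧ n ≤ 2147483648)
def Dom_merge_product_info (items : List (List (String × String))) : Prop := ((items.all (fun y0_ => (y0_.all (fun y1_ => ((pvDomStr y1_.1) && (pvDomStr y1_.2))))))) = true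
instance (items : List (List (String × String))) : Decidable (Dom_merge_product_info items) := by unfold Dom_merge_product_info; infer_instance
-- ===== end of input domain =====

-- B re-implements A's one-pass accumulator as two passes (group, then fold each group);
-- same return value; like A, the Python B mutates the head dicts of the input in place.

-- ===== PORT A =====
-- A's loop state: (merged so far, current_item as an Option — `None` / a dict, never empty when set)
def pvStepA (st : List (PySem.Dict String String) × Option (PySem.Dict String String))
    (item : PySem.Dict String String) :
    List (PySem.Dict String String) × Option (PySem.Dict String String) :=
  let name := PySem.Str.upper (item.getD "name" "")
  if (["PIZZA", "SAUMON", "CHOU-FLEUR", "COURONNE", "GRUAU", "MARGARINE", "BLEUETS", "SOUPE"]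
      : List String).any (fun kw => PySem.Str.isIn kw name) then
    match st.2 with
    | some c => (st.1 ++ [c], some item)
    | none => (st.1, some item)
  else
    match st.2 with
    | some c =>
      let c := if item.contains "price" && !(c.contains "price") then
                 c.insert "price" (item.getD "price" "") else c
      let c := if item.contains "volume" && !(c.contains "volume") then
                 c.insert "volume" (item.getD "volume" "") else c
      let c := if item.contains "description" then
                 (if !(c.contains "description") then
                    c.insert "description" (item.getD "description" "")
                  else if !(PySem.Str.isIn (item.getD "description" "") (c.getD "description" "")) then
                    c.insert "description" (c.getD "description" "" ++ " / " ++ item.getD "description" "")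
                  else c)
               else c
      (st.1, some c)
    | none => st

-- the final `if current_item: merged.append(current_item)`
def pvFinishA (st : List (PySem.Dict String String) × Option (PySem.Dict String String)) :
    List (PySem.Dict String String) :=
  match st.2 with
  | some c => st.1 ++ [c]
  | none => st.1

def merge_product_info (items : List (List (String × String))) : List (List (String × String)) :=
  (pvFinishA ((items.map PySem.Dict.ofList).foldl pvStepA ([], none))).map PySem.Dict.items

-- ===== PORT B =====
def pvIsMain (item : PySem.Dict String String) : Bool :=
  (["PIZZA", "SAUMON", "CHOU-FLEUR", "COURONNE", "GRUAU", "MARGARINE", "BLEUETS", "SOUPE"]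
    : List String).any (fun kw => PySem.Str.isIn kw (PySem.Str.upper (item.getD "name" "")))

def pvMergeInto (c item : PySem.Dict String String) : PySem.Dict String String :=
  let c := if item.contains "price" && !(c.contains "price") then
             c.insert "price" (item.getD "price" "") else c
  let c := if item.contains "volume" && !(c.contains "volume") then
             c.insert "volume" (item.getD "volume" "") else c
  if item.contains "description" then
    (if !(c.contains "description") then
       c.insert "description" (item.getD "description" "")
     else if !(PySem.Str.isIn (item.getD "description" "") (c.getD "description" "")) then
       c.insert "description" (c.getD "description" "" ++ " / " ++ item.getD "description" "")
     else c)
  else c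

-- slice the list into maximal runs, each headed by a main product (leading non-mains dropped)
def pvGroups : List (PySem.Dict String String) → List (List (PySem.Dict String String))
  | [] => []
  | x :: xs =>
    if pvIsMain x then
      (x :: xs.takeWhile (fun i => !pvIsMain i)) :: pvGroups (xs.dropWhile (fun i => !pvIsMain i))
    else pvGroups xs
termination_by l => l.length
decreasing_by
  · exact Nat.lt_succ_of_le (List.length_dropWhile_le _ _)
  · exact Nat.lt_succ_self _

-- fold a group's tail into its head ([] cannot occur: every group starts with a main item)
def pvMergeGroup (g : List (PySem.Dict String String)) : PySem.Dict String String :=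
  match g with
  | [] => PySem.Dict.empty
  | h :: t => t.foldl pvMergeInto h

def merge_product_info_alt (items : List (List (String × String))) : List (List (String × String)) :=
  ((pvGroups (items.map PySem.Dict.ofList)).map pvMergeGroup).map PySem.Dict.items

-- ===== PRECONDITION & SPEC =====
def Spec_merge_product_info (items : List (List (String × String))) (out : List (List (String × String))) : Prop := out = merge_product_info_alt items
instance (items : List (List (String × String))) (out : List (List (String × String))) : Decidable (Spec_merge_product_info items out) := by unfold Spec_merge_product_info; infer_instance

-- ===== CLAIM (what is proved, stated in full; the proofs are below) =====
def Claim_equal_merge_product_info : Prop := ∀ (items : List (List (String × String))), Dom_merge_product_info items → Spec_merge_product_info items (merge_product_info items)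

-- ===== LEMMAS AND PROOFS =====
theorem pvStepA_eq (st : List (PySem.Dict String String) × Option (PySem.Dict String String))
    (x : PySem.Dict String String) :
    pvStepA st x =
      if pvIsMain x then
        (match st.2 with
         | some c => (st.1 ++ [c], some x)
         | none => (st.1, some x))
      else
        (match st.2 with
         | some c => (st.1, some (pvMergeInto c x))
         | none => st) := by
  cases st with
  | mk m cur =>
    cases cur
    · simp only [pvStepA, pvIsMain]
    · simp only [pvStepA, pvIsMain, pvMergeInto]

theorem pvGroups_nil : pvGroups [] = [] := by rw [pvGroups]

theorem pvGroups_cons_main {x : PySem.Dict String String} (xs : List (PySem.Dict String String))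
    (h : pvIsMain x = true) :
    pvGroups (x :: xs) =
      (x :: xs.takeWhile (fun i => !pvIsMain i)) :: pvGroups (xs.dropWhile (fun i => !pvIsMain i)) := by
  rw [pvGroups, if_pos h]

theorem pvGroups_cons_not {x : PySem.Dict String String} (xs : List (PySem.Dict String String))
    (h : pvIsMain x = false) : pvGroups (x :: xs) = pvGroups xs := by
  rw [pvGroups, if_neg (by simp [h])]

-- while current_item is set, A merges the non-main run into it, flushes it, and continues at the next main
theorem pvFoldA_some (xs : List (PySem.Dict String String)) :
    ∀ (merged : List (PySem.Dict String String)) (c : PySem.Dict String String),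
    pvFinishA (xs.foldl pvStepA (merged, some c)) =
      merged ++ [(xs.takeWhile (fun i => !pvIsMain i)).foldl pvMergeInto c]
        ++ (pvGroups (xs.dropWhile (fun i => !pvIsMain i))).map pvMergeGroup := by
  induction xs with
  | nil => intro merged c; simp [pvFinishA, pvGroups_nil]
  | cons x xs ih =>
    intro merged c
    by_cases h : pvIsMain x = true
    · rw [List.foldl_cons, pvStepA_eq]
      simp only [h, if_pos]
      rw [ih (merged ++ [c]) x]
      rw [List.takeWhile_cons, List.dropWhile_cons]
      simp [h, pvGroups_cons_main _ h, pvMergeGroup]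
    · simp only [Bool.not_eq_true] at h
      rw [List.foldl_cons, pvStepA_eq]
      simp only [h, Bool.false_eq_true, if_false]
      rw [ih merged (pvMergeInto c x)]
      rw [List.takeWhile_cons, List.dropWhile_cons]
      simp [h]

-- before the first main product A accumulates nothing; from there on the groups appear one by one
theorem pvFoldA_none (xs : List (PySem.Dict String String)) :
    ∀ (merged : List (PySem.Dict String String)),
    pvFinishA (xs.foldl pvStepA (merged, none)) = merged ++ (pvGroups xs).map pvMergeGroup := by
  induction xs with
  | nil => intro merged; simp [pvFinishA, pvGroups_nil]
  | cons x xs ih =>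
    intro merged
    by_cases h : pvIsMain x = true
    · rw [List.foldl_cons, pvStepA_eq]
      simp only [h, if_pos]
      rw [pvFoldA_some xs merged x, pvGroups_cons_main _ h]
      simp [pvMergeGroup]
    · simp only [Bool.not_eq_true] at h
      rw [List.foldl_cons, pvStepA_eq]
      simp only [h, Bool.false_eq_true, if_false]
      rw [ih merged, pvGroups_cons_not _ h]

-- ===== VERDICT (by name: the statement is the Claim_ definition above) =====
theorem merge_product_info_spec : Claim_equal_merge_product_info := by
  intro items _
  unfold Spec_merge_product_info merge_product_info merge_product_info_alt
  rw [pvFoldA_none]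
  simp
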